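-- pv_equiv track=rewrite | github.com/vismaychuriwala/Physics_Informed_Neural_Networks-LLG | utils.py | linear_interaction_matrix
-- ===== SOURCE A (Python) =====
-- def linear_interaction_matrix(dim):
--     mat = [[0]*dim for _ in range(dim)]
--     for i in range(dim):
--         if(i - 1 >= 0):
--             mat[i][i-1] = 1
--         if(i + 1 < dim):
--             mat[i][i+1] = 1
--     return mat
-- ===== SOURCE B (Python) =====
-- def linear_interaction_matrix(dim):
--     def row(i):
--         if dim <= 1:
--             return [0] * dim
--         if i == 0:
--             return [0, 1] + [0] * (dim - 2)
--         if i == dim - 1: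
--             return [0] * (dim - 2) + [1, 0]
--         return [0] * (i - 1) + [1, 0, 1] + [0] * (dim - i - 2)
--     return [row(i) for i in range(dim)]
-- ===== Notes on version B (the rewrite author's own statement) =====
-- stated objective: alternative
-- what changed: Replaces the zero-fill-then-mutate-neighbors loop with a closed-form per-row construction: each row is assembled directly as zero-block ++ neighbor ones ++ zero-block, with explicit first/last/degenerate row cases instead of in-place writes.
import Mathlib
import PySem

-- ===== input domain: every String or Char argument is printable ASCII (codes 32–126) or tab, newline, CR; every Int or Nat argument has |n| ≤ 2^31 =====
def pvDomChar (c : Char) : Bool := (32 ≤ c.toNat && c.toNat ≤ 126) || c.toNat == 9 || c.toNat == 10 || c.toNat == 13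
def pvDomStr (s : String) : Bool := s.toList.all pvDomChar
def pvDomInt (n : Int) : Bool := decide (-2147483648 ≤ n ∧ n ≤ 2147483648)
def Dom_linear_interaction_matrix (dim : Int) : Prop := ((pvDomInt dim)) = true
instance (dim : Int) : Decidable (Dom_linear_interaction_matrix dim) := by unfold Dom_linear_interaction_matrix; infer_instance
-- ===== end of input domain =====

-- B replaces A's zero-fill-then-mutate-neighbors loop with a closed-form per-row construction (zero-block ++ neighbor ones ++ zero-block); alternative decomposition, same cost.

-- ===== PORT A =====
-- A-side helper: the body of A's for-loop (the two conditional in-place writes).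
def pvStepA (dim : Int) (mat : List (List Int)) (i : Int) : List (List Int) :=
  let mat1 := if i - 1 ≥ 0 then
      PySem.List.pySetD mat i (PySem.List.pySetD (PySem.List.pyGetD mat i []) (i - 1) 1)
    else mat
  if i + 1 < dim then
      PySem.List.pySetD mat1 i (PySem.List.pySetD (PySem.List.pyGetD mat1 i []) (i + 1) 1)
    else mat1

def linear_interaction_matrix (dim : Int) : List (List Int) :=
  let mat := (PySem.List.pyRange 0 dim 1).map (fun _ => List.replicate dim.toNat (0 : Int))
  (PySem.List.pyRange 0 dim 1).foldl (pvStepA dim) mat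

-- ===== PORT B =====
-- B-side helper: the closed-form row(i) of Source B.
def pvRowB (dim : Int) (i : Int) : List Int :=
  if dim ≤ 1 then List.replicate dim.toNat (0 : Int)
  else if i = 0 then [0, 1] ++ List.replicate (dim - 2).toNat (0 : Int)
  else if i = dim - 1 then List.replicate (dim - 2).toNat (0 : Int) ++ [1, 0]
  else List.replicate (i - 1).toNat (0 : Int) ++ [1, 0, 1] ++ List.replicate (dim - i - 2).toNat (0 : Int)

def linear_interaction_matrix_alt (dim : Int) : List (List Int) :=
  (PySem.List.pyRange 0 dim 1).map (fun i => pvRowB dim i)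

-- ===== PRECONDITION & SPEC =====
def Spec_linear_interaction_matrix (dim : Int) (out : List (List Int)) : Prop := out = linear_interaction_matrix_alt dim
instance (dim : Int) (out : List (List Int)) : Decidable (Spec_linear_interaction_matrix dim out) := by unfold Spec_linear_interaction_matrix; infer_instance

-- ===== CLAIM (what is proved, stated in full; the proofs are below) =====
def Claim_equal_linear_interaction_matrix : Prop := ∀ (dim : Int), Dom_linear_interaction_matrix dim → Spec_linear_interaction_matrix dim (linear_interaction_matrix dim)

-- ===== LEMMAS AND PROOFS =====

-- What one pass of A's loop body does to row i when 0 ≤ i < mat.length.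
def pvRow (dim : Int) (i : Int) (row : List Int) : List Int :=
  let r1 := if i - 1 ≥ 0 then PySem.List.pySetD row (i - 1) 1 else row
  if i + 1 < dim then PySem.List.pySetD r1 (i + 1) 1 else r1

theorem pvStepA_eq_set (dim : Int) (mat : List (List Int)) (i : Int)
    (h0 : 0 ≤ i) (hlt : i.toNat < mat.length) :
    pvStepA dim mat i = mat.set i.toNat (pvRow dim i (mat[i.toNat])) := by
  obtain ⟨m, rfl⟩ : ∃ m : Nat, i = (m : Int) := ⟨i.toNat, by omega⟩
  have hm : m < mat.length := by simpa using hlt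
  simp only [pvStepA, pvRow, PySem.List.pySetD_natCast, PySem.List.pyGetD_natCast,
    Int.toNat_natCast]
  split_ifs <;>
    simp [List.getD, List.getElem?_set_self hm, List.getElem?_eq_getElem hm, List.set_set]

theorem pvStepA_length (dim : Int) (mat : List (List Int)) (i : Int) :
    (pvStepA dim mat i).length = mat.length := by
  unfold pvStepA
  split_ifs <;> simp [PySem.List.length_pySetD]

-- The loop invariant: after processing range(a, dim), row k is transformed iff a ≤ k.
theorem foldl_stepA_getElem? (dim : Int) :
    ∀ (n : Nat) (a : Int), 0 ≤ a → (dim - a).toNat = n →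
    ∀ (mat : List (List Int)), mat.length = dim.toNat →
    ∀ (k : Nat), k < dim.toNat →
    ((PySem.List.pyRange a dim 1).foldl (pvStepA dim) mat)[k]? =
      some (if a ≤ (k : Int) then pvRow dim k (mat.getD k []) else mat.getD k []) := by
  intro n
  induction n with
  | zero =>
    intro a ha hn mat hlen k hk
    rw [PySem.List.pyRange_one_eq_nil (by omega)]
    have hka : ¬ a ≤ (k : Int) := by omega
    simp [hka, List.getElem?_eq_getElem (by omega : k < mat.length), List.getD]
  | succ n ih =>
    intro a ha hn mat hlen k hk
    have halt : a < dim := by omega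
    rw [PySem.List.pyRange_one_cons halt, List.foldl_cons]
    have hlen' : (pvStepA dim mat a).length = dim.toNat := by
      rw [pvStepA_length]; exact hlen
    have hma : a.toNat < mat.length := by omega
    rw [ih (a + 1) (by omega) (by omega) _ hlen' k hk]
    rw [pvStepA_eq_set dim mat a ha hma]
    by_cases hk1 : a + 1 ≤ (k : Int)
    · have hne : k ≠ a.toNat := by omega
      simp [hk1, (by omega : a ≤ (k : Int)), List.getD,
        List.getElem?_set_ne (by omega : a.toNat ≠ k)]
    · by_cases hk2 : a ≤ (k : Int)
      · have hke : k = a.toNat := by omega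
        have hka : ((k : Nat) : Int) = a := by omega
        have hgd : (mat.set a.toNat (pvRow dim a (mat[a.toNat]))).getD k [] =
            pvRow dim a (mat[a.toNat]) := by
          rw [hke, List.getD, List.getElem?_set_self (by omega), Option.getD_some]
        have hgd2 : mat.getD k [] = mat[a.toNat] := by
          rw [hke, List.getD, List.getElem?_eq_getElem hma, Option.getD_some]
        rw [if_neg hk1, if_pos hk2, hgd, hgd2, hka]
      · simp [hk1, hk2, List.getD, List.getElem?_set_ne (by omega : a.toNat ≠ k)]

-- pvRow of the all-zero row is exactly B's comprehension row.
theorem pvRow_replicate (dim : Int) (k : Nat) (hk : (k : Int) < dim) :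
    pvRow dim k (List.replicate dim.toNat (0 : Int)) =
      (PySem.List.pyRange 0 dim 1).map (fun j => if ((k : Int) - j).natAbs = 1 then 1 else 0) := by
  have e2 : ((k : Int) + 1) = (((k + 1 : Nat)) : Int) := by push_cast; ring
  apply List.ext_getElem
  · simp only [pvRow]
    split_ifs <;> simp [PySem.List.length_pySetD, PySem.List.length_pyRange_one]
  · intro j hj1 hj2
    have hjd : j < dim.toNat := by
      simp [PySem.List.length_pyRange_one] at hj2; omega
    have hrhs : ((PySem.List.pyRange 0 dim 1).map
        (fun j => if ((k : Int) - j).natAbs = 1 then (1 : Int) else 0))[j]'hj2 =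
        (if ((k : Int) - (j : Int)).natAbs = 1 then (1 : Int) else 0) := by
      simp [PySem.List.getElem_pyRange_one]
    rw [hrhs]
    simp only [pvRow]
    split_ifs with h1 h2 h2
    · -- both neighbors exist: 1 ≤ k and k + 1 < dim
      have e1 : ((k : Int) - 1) = (((k - 1 : Nat)) : Int) := by omega
      simp only [e1, e2, PySem.List.pySetD_natCast]
      simp only [List.getElem_set, List.getElem_replicate]
      split_ifs <;> omega
    · -- k = 0, only the right neighbor
      simp only [e2, PySem.List.pySetD_natCast]
      simp only [List.getElem_set, List.getElem_replicate]
      split_ifs <;> omega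
    · -- k = dim - 1 ≥ 1, only the left neighbor
      have e1 : ((k : Int) - 1) = (((k - 1 : Nat)) : Int) := by omega
      simp only [e1, PySem.List.pySetD_natCast]
      simp only [List.getElem_set, List.getElem_replicate]
      split_ifs <;> omega
    · -- dim = 1: the single row stays all zero
      simp only [List.getElem_replicate]
      split_ifs <;> omega

-- B's closed-form row agrees with the abs(i-j)==1 characterisation.
theorem pvRowB_eq (dim : Int) (k : Nat) (hk : (k : Int) < dim) :
    pvRowB dim k =
      (PySem.List.pyRange 0 dim 1).map (fun j => if ((k : Int) - j).natAbs = 1 then 1 else 0) := by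
  apply List.ext_getElem
  · simp only [pvRowB]
    split_ifs with h1 h2 h3 <;>
      simp [PySem.List.length_pyRange_one] <;> omega
  · intro j hj1 hj2
    have hjd : j < dim.toNat := by
      simp [PySem.List.length_pyRange_one] at hj2; omega
    have hrhs : ((PySem.List.pyRange 0 dim 1).map
        (fun j => if ((k : Int) - j).natAbs = 1 then (1 : Int) else 0))[j]'hj2 =
        (if ((k : Int) - (j : Int)).natAbs = 1 then (1 : Int) else 0) := by
      simp [PySem.List.getElem_pyRange_one]
    rw [hrhs]
    simp only [pvRowB]
    split_ifs with h1 h2 h3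
    · -- dim = 1: single zero row
      simp only [List.getElem_replicate]
      split_ifs <;> omega
    · -- k = 0, dim ≥ 2: [0, 1] ++ zeros
      rcases j with _ | _ | j <;> simp_all [List.getElem_replicate]
      omega
    · -- k = dim - 1 ≥ 1: zeros ++ [1, 0]
      have hkd : k = dim.toNat - 1 := by omega
      have hlen : (List.replicate (dim - 2).toNat (0 : Int)).length = dim.toNat - 2 := by
        simp; omega
      rcases Nat.lt_trichotomy j (dim.toNat - 2) with hlt | heq | hgt
      · rw [List.getElem_append_left (by omega), List.getElem_replicate]
        split_ifs <;> omega
      · rw [List.getElem_append_right (by omega)]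
        have e : j - (List.replicate (dim - 2).toNat (0 : Int)).length = 0 := by omega
        simp only [e, List.getElem_cons_zero]
        split_ifs <;> omega
      · rw [List.getElem_append_right (by omega)]
        have e : j - (List.replicate (dim - 2).toNat (0 : Int)).length = 1 := by omega
        simp only [e, List.getElem_cons_succ, List.getElem_cons_zero]
        split_ifs <;> omega
    · -- middle row: zeros ++ [1, 0, 1] ++ zeros
      have hk1 : 1 ≤ k := by
        rcases Nat.eq_zero_or_pos k with h | h
        · exfalso; apply h2; omega
        · exact h
      have hk2 : (k : Int) + 1 < dim := by
        rcases lt_or_ge ((k : Int) + 1) dim with h | h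
        · exact h
        · exfalso; apply h3; omega
      have hlen : (List.replicate ((k : Int) - 1).toNat (0 : Int)).length = k - 1 := by
        rw [List.length_replicate]; omega
      have hlenL : (List.replicate ((k : Int) - 1).toNat (0 : Int) ++ [1, 0, 1]).length
          = k + 2 := by
        rw [List.length_append, List.length_replicate]; simp only [List.length_cons,
          List.length_nil]; omega
      rcases Nat.lt_trichotomy j (k - 1) with hlt | heq | hgt
      · -- j < k - 1: left zero block
        rw [List.getElem_append_left (by omega), List.getElem_append_left (by omega),
          List.getElem_replicate]
        split_ifs <;> omega
      · -- j = k - 1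
        rw [List.getElem_append_left (by omega), List.getElem_append_right (by omega)]
        have e : j - (List.replicate ((k : Int) - 1).toNat (0 : Int)).length = 0 := by omega
        simp only [e, List.getElem_cons_zero]
        split_ifs <;> omega
      · rcases Nat.lt_trichotomy j (k + 1) with hlt2 | heq2 | hgt2
        · -- j = k
          rw [List.getElem_append_left (by omega), List.getElem_append_right (by omega)]
          have e : j - (List.replicate ((k : Int) - 1).toNat (0 : Int)).length = 1 := by omega
          simp only [e, List.getElem_cons_succ, List.getElem_cons_zero]
          split_ifs <;> omega
        · -- j = k + 1
          rw [List.getElem_append_left (by omega), List.getElem_append_right (by omega)]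
          have e : j - (List.replicate ((k : Int) - 1).toNat (0 : Int)).length = 2 := by omega
          simp only [e, List.getElem_cons_succ, List.getElem_cons_zero]
          split_ifs <;> omega
        · -- j > k + 1: right zero block
          rw [List.getElem_append_right (by omega), List.getElem_replicate]
          split_ifs <;> omega

-- ===== VERDICT (by name: the statement is the Claim_ definition above) =====
theorem linear_interaction_matrix_spec : Claim_equal_linear_interaction_matrix := by
  intro dim _
  simp only [Spec_linear_interaction_matrix, linear_interaction_matrix, linear_interaction_matrix_alt]
  by_cases hd : dim ≤ 0
  · rw [PySem.List.pyRange_one_eq_nil (by omega)]; rfl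
  · have hlen0 : ((PySem.List.pyRange 0 dim 1).map
        (fun _ => List.replicate dim.toNat (0 : Int))).length = dim.toNat := by
      simp [PySem.List.length_pyRange_one]
    have hlenA : ((PySem.List.pyRange 0 dim 1).foldl (pvStepA dim)
        ((PySem.List.pyRange 0 dim 1).map (fun _ => List.replicate dim.toNat (0 : Int)))).length
        = dim.toNat := by
      rw [List.foldl_eq_foldr_reverse] at *
      generalize ((PySem.List.pyRange 0 dim 1).reverse) = l
      induction l with
      | nil => simp only [List.foldr_nil]; exact hlen0
      | cons x l ih => rw [List.foldr_cons, pvStepA_length]; exact ih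
    apply List.ext_getElem?
    intro k
    by_cases hk : k < dim.toNat
    · rw [foldl_stepA_getElem? dim (dim - 0).toNat 0 le_rfl rfl _ hlen0 k hk]
      have hmat0 : ((PySem.List.pyRange 0 dim 1).map
          (fun _ => List.replicate dim.toNat (0 : Int))).getD k [] =
          List.replicate dim.toNat (0 : Int) := by
        rw [List.getD, List.getElem?_eq_getElem (by omega : k < _), List.getElem_map]
        rfl
      rw [hmat0]
      have hrhs : ((PySem.List.pyRange 0 dim 1).map (fun i => pvRowB dim i))[k]? =
          some (pvRowB dim ((0 : Int) + (k : Int))) := by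
        rw [List.getElem?_map, PySem.List.getElem?_pyRange_one]
        simp [hk]
      rw [hrhs]
      simp only [(by omega : (0 : Int) ≤ (k : Int)), if_true, zero_add]
      rw [pvRow_replicate dim k (by omega), pvRowB_eq dim k (by omega)]
    · rw [List.getElem?_eq_none (by omega), List.getElem?_eq_none (by simp [PySem.List.length_pyRange_one]; omega)]
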